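-- pv_equiv track=rewrite | github.com/kindalime/catan-agent | bin/utils.py | get_all_combos
-- ===== SOURCE A (Python) =====
-- def get_all_combos(data): # accepts a counter.
--     combos = [{}]
--     for key in data:
--         if data[key] == 0:
--             for c in combos:
--                 c[key] = 0
--         else:
--             new_combos = []
--             for c in combos:
--                 for i in range(data[key]+1):
--                     nc = c.copy()
--                     nc[key] = i
--                     new_combos.append(nc)
--             combos = new_combos
--     return combos
-- ===== SOURCE B (Python) =====
-- import itertools
--
--
-- def get_all_combos(data):  # accepts a counter.
--     keys = list(data)
--     ranges = [range(data[k] + 1) for k in keys]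
--     return [dict(zip(keys, combo)) for combo in itertools.product(*ranges)]
-- ===== Notes on version B (the rewrite author's own statement) =====
-- stated objective: idiomatic
-- what changed: Replaces A's incremental key-by-key rebuilding of the combo list (copying every partial dict for each new value) with a precomputed range table per key and a single itertools.product pass that zips each produced value tuple with the key list.
import Mathlib
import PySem

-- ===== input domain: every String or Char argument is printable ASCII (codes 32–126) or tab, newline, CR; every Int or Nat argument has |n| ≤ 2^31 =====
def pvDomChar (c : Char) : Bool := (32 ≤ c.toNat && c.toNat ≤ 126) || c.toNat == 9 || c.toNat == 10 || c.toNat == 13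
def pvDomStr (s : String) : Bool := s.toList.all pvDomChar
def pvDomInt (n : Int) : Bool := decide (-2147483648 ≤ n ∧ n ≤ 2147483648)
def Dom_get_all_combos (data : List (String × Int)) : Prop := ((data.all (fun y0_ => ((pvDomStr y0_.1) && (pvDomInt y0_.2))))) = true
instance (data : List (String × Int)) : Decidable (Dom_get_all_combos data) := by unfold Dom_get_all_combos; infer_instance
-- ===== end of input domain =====

-- B replaces A's incremental key-by-key combo-list rebuilding with a range table and one
-- Cartesian-product pass (idiomatic itertools.product formulation); same return value.

-- ===== PORT A =====
-- The Python argument is a dict (a Counter); the association list is read into a dict first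
-- (insertion order, last value wins), exactly as dict construction does.
def get_all_combos (data : List (String × Int)) : List (List (String × Int)) :=
  let d : PySem.Dict String Int := PySem.Dict.ofList data
  let combos : List (PySem.Dict String Int) :=
    d.keys.foldl (fun combos key =>
      if d.getD key 0 = 0 then
        -- for c in combos: c[key] = 0
        combos.map (fun c => c.insert key 0)
      else
        -- new_combos = []; for c in combos: for i in range(data[key]+1):
        --   nc = c.copy(); nc[key] = i; new_combos.append(nc)
        combos.foldl (fun new_combos c =>
          new_combos ++ (PySem.List.pyRange 0 (d.getD key 0 + 1) 1).map (fun i => c.insert key i)) [])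
      [PySem.Dict.empty]
  combos.map (fun c => c.items)

-- ===== PORT B =====
-- keys = list(data); ranges = [range(data[k]+1) for k in keys]; itertools.product(*ranges) is the
-- right-fastest foldr of flatMap/map; dict(zip(keys, combo)) over the distinct dict keys is keys.zip combo.
def get_all_combos_alt (data : List (String × Int)) : List (List (String × Int)) :=
  let d : PySem.Dict String Int := PySem.Dict.ofList data
  let keys := d.keys
  let ranges := keys.map (fun k => PySem.List.pyRange 0 (d.getD k 0 + 1) 1)
  let product := ranges.foldr (fun r acc => r.flatMap (fun i => acc.map (i :: ·))) [[]]
  product.map (fun combo => keys.zip combo)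

-- ===== PRECONDITION & SPEC =====
def Spec_get_all_combos (data : List (String × Int)) (out : List (List (String × Int))) : Prop := out = get_all_combos_alt data
instance (data : List (String × Int)) (out : List (List (String × Int))) : Decidable (Spec_get_all_combos data out) := by unfold Spec_get_all_combos; infer_instance

-- ===== CLAIM (what is proved, stated in full; the proofs are below) =====
def Claim_equal_get_all_combos : Prop := ∀ (data : List (String × Int)), Dom_get_all_combos data → Spec_get_all_combos data (get_all_combos data)

-- ===== LEMMAS AND PROOFS =====

-- The product of the ranges of the keys in `ks`, right-fastest (B's foldr, unfolded over ks).
def pvTuples (d : PySem.Dict String Int) (ks : List String) : List (List Int) :=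
  ks.foldr (fun k acc => (PySem.List.pyRange 0 (d.getD k 0 + 1) 1).flatMap (fun i => acc.map (i :: ·))) [[]]

-- A's step for one key, in flatMap form (covers both branches: range(0+1) = [0]).
theorem pvStep_eq (d : PySem.Dict String Int) (k : String) (combos : List (PySem.Dict String Int)) :
    (if d.getD k 0 = 0 then combos.map (fun c => c.insert k 0)
     else combos.foldl (fun nc c =>
        nc ++ (PySem.List.pyRange 0 (d.getD k 0 + 1) 1).map (fun i => c.insert k i)) []) =
    combos.flatMap (fun c => (PySem.List.pyRange 0 (d.getD k 0 + 1) 1).map (fun i => c.insert k i)) := by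
  split_ifs with h
  · rw [h]
    have hr : PySem.List.pyRange 0 (0 + 1) 1 = [0] := by decide
    simp only [hr, List.map_cons, List.map_nil, List.flatMap]
    induction combos with
    | nil => rfl
    | cons c cs ihc => simp_all
  · exact PySem.List.foldl_append_eq_flatMap _ _ _

-- Loop invariant: folding A's step over keys `ks` (all fresh for every combo, pairwise distinct)
-- produces, at the items level, each combo extended by every tuple of pvTuples, zipped with ks.
theorem pvLoop_eq (d : PySem.Dict String Int) :
    ∀ (ks : List String) (combos : List (PySem.Dict String Int)),
      ks.Nodup → (∀ c ∈ combos, ∀ k ∈ ks, c.contains k = false) →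
      ((ks.foldl (fun combos key =>
          if d.getD key 0 = 0 then combos.map (fun c => c.insert key 0)
          else combos.foldl (fun nc c =>
            nc ++ (PySem.List.pyRange 0 (d.getD key 0 + 1) 1).map (fun i => c.insert key i)) [])
        combos).map (fun c => c.items)) =
      combos.flatMap (fun c => (pvTuples d ks).map (fun t => c.items ++ ks.zip t)) := by
  intro ks
  induction ks with
  | nil =>
    intro combos _ _
    simp only [List.foldl_nil, pvTuples, List.foldr_nil, List.flatMap]
    induction combos with
    | nil => rfl
    | cons c cs ihc => simp_all
  | cons k ks ih =>
    intro combos hnd hfresh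
    rw [List.foldl_cons, pvStep_eq]
    rw [ih _ hnd.of_cons]
    · -- rearrange both sides into nested flatMaps and compare pointwise
      simp only [pvTuples, List.foldr_cons, List.flatMap_assoc, List.map_flatMap,
        List.flatMap_map, List.map_map]
      apply List.flatMap_congr
      intro c hc
      apply List.flatMap_congr
      intro i _
      have hk : c.contains k = false := hfresh c hc k (List.mem_cons_self ..)
      apply List.map_congr_left
      intro t _
      rw [PySem.Dict.items_insert_of_not_contains _ _ hk]
      simp
    · -- freshness is preserved: new combos are old ones with k inserted, and ks avoids k
      intro c' hc' k' hk'
      rw [List.mem_flatMap] at hc'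
      obtain ⟨c, hc, hc'⟩ := hc'
      rw [List.mem_map] at hc'
      obtain ⟨i, _, rfl⟩ := hc'
      rw [PySem.Dict.contains_insert]
      have hne : k' ≠ k := fun h => ((List.nodup_cons.mp hnd).1 (h ▸ hk')).elim
      simp [hne, hfresh c hc k' (List.mem_cons_of_mem _ hk')]

-- ===== VERDICT (by name: the statement is the Claim_ definition above) =====
theorem get_all_combos_spec : Claim_equal_get_all_combos := by
  intro data _
  unfold Spec_get_all_combos get_all_combos get_all_combos_alt
  simp only []
  rw [pvLoop_eq (PySem.Dict.ofList data) (PySem.Dict.ofList data).keys [PySem.Dict.empty]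
      (PySem.Dict.nodup_keys_ofList data)
      (by intro c hc k _; simp at hc; subst hc; exact PySem.Dict.contains_empty k)]
  rw [List.foldr_map]
  simp [pvTuples, PySem.Dict.empty]
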